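-- pv_equiv track=rewrite | github.com/schreiberbrett/graph-theory | tangle/example-algorithm.py | verify_cbs
-- ===== SOURCE A (Python) =====
-- def verify_cbs(proof_step, current_proof_step, graph):
--     if current_proof_step == [] and graph == []:
--         return True
--
--     proof_step_v = current_proof_step[0]
--     graph_v = graph[0]
--
--     return (
--         p(proof_step, graph_v, proof_step_v) and
--         verify_cbs(proof_step, current_proof_step[1:], graph[1:])
--     )
--
-- def p(proof_step, graph_v, proof_step_v):
--     if proof_step == [] and graph_v == []:
--         return True
--
--     proof_step_u = proof_step[0]
--     graph_v_u = graph_v[0]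
--
--     return (
--         ((graph_v_u == 1) or (
--             (not_r1(proof_step_v) or not_r2(proof_step_u)) and
--             (not_r2(proof_step_v) or not_r1(proof_step_u))
--         ) and p(proof_step[1:], graph_v[1:], proof_step_v))
--     )
--
-- def not_r1(x):
--     return (
--         x == 'r2' or
--         x == 'b1' or
--         x == 'b2' or
--         x == 'b' or
--         x == 'o'
--     )
--
-- def not_r2(x):
--     return (
--         x == 'r1' or
--         x == 'b1' or
--         x == 'b2' or
--         x == 'b' or
--         x == 'o'
--     )
-- ===== SOURCE B (Python) =====
-- def not_r1(x):
--     return x in ('r2', 'b1', 'b2', 'b', 'o')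
--
-- def not_r2(x):
--     return x in ('r1', 'b1', 'b2', 'b', 'o')
--
-- def verify_cbs(proof_step, current_proof_step, graph):
--     for v, row in zip(current_proof_step, graph):
--         nr1v = not_r1(v)
--         nr2v = not_r2(v)
--         for u, g in zip(proof_step, row):
--             if g == 1:
--                 break
--             if not ((nr1v or not_r2(u)) and (nr2v or not_r1(u))):
--                 return False
--     return True
-- ===== Notes on version B (the rewrite author's own statement) =====
-- stated objective: alternative
-- what changed: Replaced A's recursive list-slicing (each recursive call of verify_cbs and p copies the remaining lists) with flat nested for-loops over zipped lists, using break/early-return to preserve the short-circuit behaviour; Pre_ is exactly the inputs where A returns without IndexError.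
import Mathlib
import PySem

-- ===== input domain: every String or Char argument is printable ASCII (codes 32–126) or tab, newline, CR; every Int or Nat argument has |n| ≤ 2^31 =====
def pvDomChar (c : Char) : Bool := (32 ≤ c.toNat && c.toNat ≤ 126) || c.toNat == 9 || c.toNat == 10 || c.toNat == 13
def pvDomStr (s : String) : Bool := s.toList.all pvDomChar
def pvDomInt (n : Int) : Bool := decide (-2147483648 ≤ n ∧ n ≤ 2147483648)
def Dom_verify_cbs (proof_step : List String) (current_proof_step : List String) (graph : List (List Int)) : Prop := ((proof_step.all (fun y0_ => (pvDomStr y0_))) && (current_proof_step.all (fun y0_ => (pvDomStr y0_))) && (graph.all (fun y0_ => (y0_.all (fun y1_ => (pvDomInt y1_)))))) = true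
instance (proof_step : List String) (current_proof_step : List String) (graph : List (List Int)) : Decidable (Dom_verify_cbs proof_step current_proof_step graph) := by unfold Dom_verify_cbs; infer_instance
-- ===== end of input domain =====

-- B replaces A's recursive list-slicing with flat nested loops over zipped lists (no per-step
-- list copies), preserving A's short-circuit behaviour exactly.

-- ===== PORT A =====
def not_r1A (x : String) : Bool :=
  x == "r2" || x == "b1" || x == "b2" || x == "b" || x == "o"

def not_r2A (x : String) : Bool :=
  x == "r1" || x == "b1" || x == "b2" || x == "b" || x == "o"

-- Python p; the two `false` branches are where Python raises IndexError (excluded by Pre_)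
def pA (proof_step : List String) (graph_v : List Int) (proof_step_v : String) : Bool :=
  match proof_step, graph_v with
  | [], [] => true
  | [], _ :: _ => false      -- proof_step[0] raises
  | _ :: _, [] => false      -- graph_v[0] raises
  | u :: ps, g :: gv =>
      (g == 1) ||
      (((not_r1A proof_step_v || not_r2A u) && (not_r2A proof_step_v || not_r1A u)) &&
        pA ps gv proof_step_v)

def verify_cbs (proof_step : List String) (current_proof_step : List String) (graph : List (List Int)) : Bool :=
  match current_proof_step, graph with
  | [], [] => true
  | [], _ :: _ => false      -- current_proof_step[0] raises
  | _ :: _, [] => false      -- graph[0] raises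
  | v :: cs, gv :: gs => pA proof_step gv v && verify_cbs proof_step cs gs

-- ===== PORT B =====
-- inner loop of Source B: `for u, g in zip(proof_step, row)` with break on g == 1, early False on a bad pair
def altRow (nr1v : Bool) (nr2v : Bool) : List (String × Int) → Bool
  | [] => true
  | (u, g) :: rest =>
      if g == 1 then true       -- break
      else if !((nr1v || not_r2A u) && (nr2v || not_r1A u)) then false   -- return False
      else altRow nr1v nr2v rest

-- outer loop of Source B: `for v, row in zip(current_proof_step, graph)`
def altRows (proof_step : List String) : List (String × List Int) → Bool
  | [] => true
  | (v, row) :: rest =>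
      if altRow (not_r1A v) (not_r2A v) (proof_step.zip row) then altRows proof_step rest
      else false                -- return False

def verify_cbs_alt (proof_step : List String) (current_proof_step : List String) (graph : List (List Int)) : Bool :=
  altRows proof_step (current_proof_step.zip graph)

-- ===== PRECONDITION & SPEC =====
def pairokP (v u : String) : Bool :=
  (not_r1A v || not_r2A u) && (not_r2A v || not_r1A u)

-- p scans a row left to right and stops at the first index with a 1 or a bad pair:
-- it returns True iff it hits a 1 first (all earlier pairs good) or completes a full equal-length scan
def rowTrueChk (ps : List String) (row : List Int) (v : String) : Bool :=
  ((List.range (min ps.length row.length)).any (fun j =>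
      row.getD j 0 == 1 && (List.range j).all (fun k => pairokP v (ps.getD k "")))) ||
  (ps.length == row.length &&
    (List.range (min ps.length row.length)).all (fun j => pairokP v (ps.getD j "")))

-- it returns False iff some bad pair occurs with no 1 at or before it
def rowFalseChk (ps : List String) (row : List Int) (v : String) : Bool :=
  (List.range (min ps.length row.length)).any (fun j =>
      !pairokP v (ps.getD j "") && (List.range (j + 1)).all (fun k => !(row.getD k 0 == 1)))

-- Pre_ = exactly the inputs on which Python A returns (no IndexError): either every row scan of an
-- equal-length outer zip terminates True, or some row scan terminates False after earlier True rows.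
def Pre_verify_cbs (proof_step : List String) (current_proof_step : List String) (graph : List (List Int)) : Prop :=
  ((current_proof_step.length == graph.length &&
      (List.range (min current_proof_step.length graph.length)).all (fun i =>
        rowTrueChk proof_step (graph.getD i []) (current_proof_step.getD i ""))) ||
   (List.range (min current_proof_step.length graph.length)).any (fun i =>
      rowFalseChk proof_step (graph.getD i []) (current_proof_step.getD i "") &&
      (List.range i).all (fun k =>
        rowTrueChk proof_step (graph.getD k []) (current_proof_step.getD k "")))) = true

instance (proof_step : List String) (current_proof_step : List String) (graph : List (List Int)) : Decidable (Pre_verify_cbs proof_step current_proof_step graph) := by unfold Pre_verify_cbs; infer_instance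

def pvWitness_verify_cbs : List String × List String × List (List Int) := (["r1"], ["r2"], [[0]])

def Spec_verify_cbs (proof_step : List String) (current_proof_step : List String) (graph : List (List Int)) (out : Bool) : Prop := out = verify_cbs_alt proof_step current_proof_step graph
instance (proof_step : List String) (current_proof_step : List String) (graph : List (List Int)) (out : Bool) : Decidable (Spec_verify_cbs proof_step current_proof_step graph out) := by unfold Spec_verify_cbs; infer_instance

-- ===== CLAIM (what is proved, stated in full; the proofs are below) =====
def Claim_equal_verify_cbs : Prop := ∀ (proof_step : List String) (current_proof_step : List String) (graph : List (List Int)), Dom_verify_cbs proof_step current_proof_step graph → Pre_verify_cbs proof_step current_proof_step graph → Spec_verify_cbs proof_step current_proof_step graph (verify_cbs proof_step current_proof_step graph)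

-- ===== LEMMAS AND PROOFS =====

theorem rowTrueChk_iff (ps : List String) (row : List Int) (v : String) :
    rowTrueChk ps row v = true ↔
    ((∃ j, j < min ps.length row.length ∧ row.getD j 0 = 1 ∧
        ∀ k, k < j → pairokP v (ps.getD k "") = true) ∨
     (ps.length = row.length ∧
        ∀ j, j < min ps.length row.length → pairokP v (ps.getD j "") = true)) := by
  simp [rowTrueChk, List.any_eq_true, List.all_eq_true, List.mem_range]

theorem rowFalseChk_iff (ps : List String) (row : List Int) (v : String) :
    rowFalseChk ps row v = true ↔
    (∃ j, j < min ps.length row.length ∧ pairokP v (ps.getD j "") = false ∧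
        ∀ k, k < j + 1 → ¬(row.getD k 0 = 1)) := by
  simp [rowFalseChk, List.any_eq_true, List.all_eq_true, List.mem_range]

theorem Pre_iff (ps : List String) (cs : List String) (g : List (List Int)) :
    Pre_verify_cbs ps cs g ↔
    ((cs.length = g.length ∧
        ∀ i, i < min cs.length g.length →
          rowTrueChk ps (g.getD i []) (cs.getD i "") = true) ∨
     (∃ i, i < min cs.length g.length ∧
        rowFalseChk ps (g.getD i []) (cs.getD i "") = true ∧
        ∀ k, k < i → rowTrueChk ps (g.getD k []) (cs.getD k "") = true)) := by
  simp [Pre_verify_cbs, List.any_eq_true, List.all_eq_true, List.mem_range]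

theorem rowTrue_sound (ps : List String) (row : List Int) (v : String)
    (h : rowTrueChk ps row v = true) :
    pA ps row v = true ∧ altRow (not_r1A v) (not_r2A v) (ps.zip row) = true := by
  induction ps generalizing row with
  | nil =>
    rw [rowTrueChk_iff] at h
    rcases h with ⟨j, hj, _⟩ | ⟨hlen, _⟩
    · simp at hj
    · have : row = [] := List.eq_nil_of_length_eq_zero hlen.symm
      subst this
      exact ⟨rfl, rfl⟩
  | cons u ps ih =>
    cases row with
    | nil =>
      rw [rowTrueChk_iff] at h
      rcases h with ⟨j, hj, _⟩ | ⟨hlen, _⟩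
      · simp at hj
      · simp at hlen
    | cons gval gv =>
      by_cases hg : gval = 1
      · subst hg
        constructor
        · simp [pA]
        · simp [altRow]
      · rw [rowTrueChk_iff] at h
        have hpk : pairokP v u = true ∧ rowTrueChk ps gv v = true := by
          rcases h with ⟨j, hj, h1, hall⟩ | ⟨hlen, hall⟩
          · cases j with
            | zero => simp at h1; exact absurd h1 hg
            | succ k =>
              refine ⟨hall 0 (Nat.succ_pos _), ?_⟩
              rw [rowTrueChk_iff]
              left
              refine ⟨k, ?_, ?_, ?_⟩
              · simp at hj; omega
              · simpa using h1
              · intro k' hk'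
                have := hall (k' + 1) (by omega)
                simpa using this
          · refine ⟨hall 0 (by simp at hlen ⊢; try omega), ?_⟩
            rw [rowTrueChk_iff]
            right
            refine ⟨by simpa using hlen, ?_⟩
            intro j hj
            have := hall (j + 1) (by simp at hj ⊢; omega)
            simpa using this
        obtain ⟨hpk, htail⟩ := hpk
        obtain ⟨ha, hb⟩ := ih gv htail
        have h2 : ((not_r1A v || not_r2A u) && (not_r2A v || not_r1A u)) = true := hpk
        constructor
        · simp [pA, ha, h2]
        · simp [altRow, h2, hb]

theorem rowFalse_sound (ps : List String) (row : List Int) (v : String)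
    (h : rowFalseChk ps row v = true) :
    pA ps row v = false ∧ altRow (not_r1A v) (not_r2A v) (ps.zip row) = false := by
  induction ps generalizing row with
  | nil =>
    rw [rowFalseChk_iff] at h
    obtain ⟨j, hj, _⟩ := h
    simp at hj
  | cons u ps ih =>
    cases row with
    | nil =>
      rw [rowFalseChk_iff] at h
      obtain ⟨j, hj, _⟩ := h
      simp at hj
    | cons gval gv =>
      rw [rowFalseChk_iff] at h
      obtain ⟨j, hj, hbad, hones⟩ := h
      have hg : ¬(gval = 1) := by
        have := hones 0 (by omega)
        simpa using this
      by_cases hpk : pairokP v u = true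
      · -- failure is further right; recurse
        have htail : rowFalseChk ps gv v = true := by
          rw [rowFalseChk_iff]
          cases j with
          | zero => simp at hbad; rw [hbad] at hpk; exact absurd hpk (by simp)
          | succ k =>
            refine ⟨k, by simp at hj; omega, by simpa using hbad, ?_⟩
            intro k' hk'
            have := hones (k' + 1) (by omega)
            simpa using this
        obtain ⟨ha, hb⟩ := ih gv htail
        have h2 : ((not_r1A v || not_r2A u) && (not_r2A v || not_r1A u)) = true := hpk
        constructor
        · simp [pA, ha, h2, hg]
        · simp [altRow, h2, hb, hg]
      · have h2 : ((not_r1A v || not_r2A u) && (not_r2A v || not_r1A u)) = false := by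
          have : pairokP v u = false := by
            cases hpv : pairokP v u
            · rfl
            · exact absurd hpv hpk
          exact this
        constructor
        · simp [pA, h2, hg]
        · simp [altRow, h2, hg]

theorem outer_sound (ps : List String) (cs : List String) (g : List (List Int))
    (h : Pre_verify_cbs ps cs g) :
    verify_cbs ps cs g = verify_cbs_alt ps cs g := by
  unfold verify_cbs_alt
  rw [Pre_iff] at h
  induction cs generalizing g with
  | nil =>
    rcases h with ⟨hlen, _⟩ | ⟨i, hi, _⟩
    · have : g = [] := List.eq_nil_of_length_eq_zero hlen.symm
      subst this
      rfl
    · simp at hi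
  | cons v cs ih =>
    cases g with
    | nil =>
      rcases h with ⟨hlen, _⟩ | ⟨i, hi, _⟩
      · simp at hlen
      · simp at hi
    | cons gv gs =>
      rcases h with ⟨hlen, hall⟩ | ⟨i, hi, hF, hT⟩
      · obtain ⟨ha, hb⟩ := rowTrue_sound ps gv v (by simpa using hall 0 (by simp at hlen ⊢; try omega))
        have htail : verify_cbs ps cs gs = altRows ps (cs.zip gs) := by
          apply ih
          left
          refine ⟨by simpa using hlen, ?_⟩
          intro i hi
          have := hall (i + 1) (by simp at hi ⊢; omega)
          simpa using this
        show (pA ps gv v && verify_cbs ps cs gs) = altRows ps ((v, gv) :: cs.zip gs)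
        simp [altRows, ha, hb, htail]
      · cases i with
        | zero =>
          obtain ⟨ha, hb⟩ := rowFalse_sound ps gv v (by simpa using hF)
          show (pA ps gv v && verify_cbs ps cs gs) = altRows ps ((v, gv) :: cs.zip gs)
          simp [altRows, ha, hb]
        | succ k =>
          obtain ⟨ha, hb⟩ := rowTrue_sound ps gv v (by simpa using hT 0 (Nat.succ_pos _))
          have htail : verify_cbs ps cs gs = altRows ps (cs.zip gs) := by
            apply ih
            right
            refine ⟨k, by simp at hi; omega, by simpa using hF, ?_⟩
            intro k' hk'
            have := hT (k' + 1) (by omega)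
            simpa using this
          show (pA ps gv v && verify_cbs ps cs gs) = altRows ps ((v, gv) :: cs.zip gs)
          simp [altRows, ha, hb, htail]

-- ===== VERDICT (by name: the statement is the Claim_ definition above) =====
theorem verify_cbs_spec : Claim_equal_verify_cbs := by
  intro ps cs g _ hpre
  exact outer_sound ps cs g hpre
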